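-- pv_equiv track=rewrite | github.com/iofu728/ProgrammingCode | leetcode/3628.py | numOfSubsequences
-- ===== SOURCE A (Python) =====
-- def numOfSubsequences(s: str) -> int:
--     def get_res(ss):
--         res = 0
--         L, T = 0, ss[1:].count("T")
--         for ii in range(1, n):
--             if ss[ii - 1] == "L":
--                 L += 1
--             if ss[ii] == "T":
--                 T -= 1
--             if ss[ii] == "C":
--                 res += L * T
--         return res
--
--
--     n = len(s)
--     res = max(get_res("L" + s), get_res(s + "T"))
--     LT = 0
--     tmp = get_res(s)
--     L, T = 0, s.count("T")
--     for ii in range(1, n):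
--         if s[ii - 1] == "L":
--             L += 1
--         if s[ii - 1] == "T":
--             T -= 1
--         LT = max(LT, L * T)
--     return max(res, tmp + LT)
-- ===== SOURCE B (Python) =====
-- def numOfSubsequences(s: str) -> int:
--     # One pass: base count plus three insertion gains (L at front, T at back, best C in a gap).
--     L = 0
--     T = s.count("T")
--     base = gainL = gainT = gainC = 0
--     for ch in s:
--         if L * T > gainC:
--             gainC = L * T
--         if ch == "T":
--             T -= 1
--         elif ch == "C":
--             base += L * T
--             gainL += T
--             gainT += L
--         elif ch == "L":
--             L += 1
--     return base + max(gainL, gainT, gainC)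
-- ===== Notes on version B (the rewrite author's own statement) =====
-- stated objective: faster
-- what changed: Replaces A's three rebuilt-string re-scans ("L"+s, s+"T", s via a shared-n closure) plus a fourth gap loop by a single pass that accumulates the base LCT count and the three insertion gains (gainL = C-before-T pairs, gainT = L-before-C pairs, gainC = best prefixL*suffixT gap) simultaneously.
import Mathlib
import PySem

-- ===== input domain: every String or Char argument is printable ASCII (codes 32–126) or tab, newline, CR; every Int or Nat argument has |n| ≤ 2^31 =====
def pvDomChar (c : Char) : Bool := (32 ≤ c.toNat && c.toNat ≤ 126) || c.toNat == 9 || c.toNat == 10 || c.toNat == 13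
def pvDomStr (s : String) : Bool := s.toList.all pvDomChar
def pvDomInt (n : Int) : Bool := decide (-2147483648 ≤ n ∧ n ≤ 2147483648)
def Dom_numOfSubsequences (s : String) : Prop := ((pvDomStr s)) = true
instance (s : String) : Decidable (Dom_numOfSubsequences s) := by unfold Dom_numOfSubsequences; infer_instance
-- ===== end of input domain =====

-- B replaces A's three rebuilt-string re-scans and extra gap loop by one simultaneous pass (constant-factor faster, measured).

-- ===== PORT A =====
-- body of get_res's loop: the three independent ifs on ss[ii-1] ('prev') and ss[ii] ('cur')
def gresStep (st : Int × Int × Int) (prev cur : Char) : Int × Int × Int :=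
  let L := if prev = 'L' then st.2.1 + 1 else st.2.1
  let T := if cur = 'T' then st.2.2 - 1 else st.2.2
  let res := if cur = 'C' then st.1 + L * T else st.1
  (res, L, T)

-- get_res(ss) with the closed-over n; ss.count("T") on a 1-char needle is the char count;
-- the indices ii, ii-1 are always in range for the three call sites, so pyGetD is exact there
def getRes (ss : List Char) (n : Int) : Int :=
  ((PySem.List.pyRange 1 n).foldl
    (fun st ii =>
      gresStep st (PySem.List.pyGetD ss (ii - 1) ' ') (PySem.List.pyGetD ss ii ' '))
    ((0 : Int), (0 : Int), ((PySem.List.slice ss (some 1) none).count 'T' : Int))).1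

-- body of the final LT loop: both reads are s[ii-1]
def ltStep (st : Int × Int × Int) (prev : Char) : Int × Int × Int :=
  let L := if prev = 'L' then st.2.1 + 1 else st.2.1
  let T := if prev = 'T' then st.2.2 - 1 else st.2.2
  (max st.1 (L * T), L, T)

def numOfSubsequences (s : String) : Int :=
  let cs := s.toList
  let n : Int := (cs.length : Int)
  let res := max (getRes ('L' :: cs) n) (getRes (cs ++ ['T']) n)
  let tmp := getRes cs n
  let st := (PySem.List.pyRange 1 n).foldl
    (fun st ii => ltStep st (PySem.List.pyGetD cs (ii - 1) ' '))
    ((0 : Int), (0 : Int), (cs.count 'T' : Int))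
  max res (tmp + st.1)

-- ===== PORT B =====
-- one pass over the characters; state (L, T, base, gainL, gainT, gainC)
def altStep (st : Int × Int × Int × Int × Int × Int) (ch : Char) :
    Int × Int × Int × Int × Int × Int :=
  let (L, T, base, gL, gT, gC) := st
  let gC := if L * T > gC then L * T else gC
  if ch = 'T' then (L, T - 1, base, gL, gT, gC)
  else if ch = 'C' then (L, T, base + L * T, gL + T, gT + L, gC)
  else if ch = 'L' then (L + 1, T, base, gL, gT, gC)
  else (L, T, base, gL, gT, gC)

def numOfSubsequences_alt (s : String) : Int :=
  let cs := s.toList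
  let st := cs.foldl altStep ((0 : Int), (cs.count 'T' : Int), (0 : Int), (0 : Int), (0 : Int), (0 : Int))
  st.2.2.1 + max (max st.2.2.2.1 st.2.2.2.2.1) st.2.2.2.2.2

-- ===== PRECONDITION & SPEC =====
def Spec_numOfSubsequences (s : String) (out : Int) : Prop := out = numOfSubsequences_alt s
instance (s : String) (out : Int) : Decidable (Spec_numOfSubsequences s out) := by unfold Spec_numOfSubsequences; infer_instance

-- ===== CLAIM (what is proved, stated in full; the proofs are below) =====
def Claim_equal_numOfSubsequences : Prop := ∀ (s : String), Dom_numOfSubsequences s → Spec_numOfSubsequences s (numOfSubsequences s)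

-- ===== LEMMAS AND PROOFS =====

-- counts, as Ints
def tcnt (l : List Char) : Int := (l.count 'T' : Int)
def lcnt (l : List Char) : Int := (l.count 'L' : Int)
def ccnt (l : List Char) : Int := (l.count 'C' : Int)

-- run a pairwise body over consecutive pairs of a list (the shape of A's index loops)
def grun {σ : Type} (f : σ → Char → Char → σ) : σ → List Char → σ
  | st, [] => st
  | st, [_] => st
  | st, a :: b :: t => grun f (f st a b) (b :: t)

-- spec quantities: the base LCT count with L L's already seen, the C-before-T and
-- L-before-C pair counts, and the best gap product
def sBase (L : Int) : List Char → Int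
  | [] => 0
  | c :: t => (if c = 'C' then L * tcnt t else 0) + sBase (if c = 'L' then L + 1 else L) t
def sCT : List Char → Int
  | [] => 0
  | c :: t => (if c = 'C' then tcnt t else 0) + sCT t
def sLC (L : Int) : List Char → Int
  | [] => 0
  | c :: t => (if c = 'C' then L else 0) + sLC (if c = 'L' then L + 1 else L) t
def sGC (L : Int) : List Char → Int
  | [] => 0
  | c :: t => max (L * tcnt (c :: t)) (sGC (if c = 'L' then L + 1 else L) t)

-- the res component of get_res's loop, pair-recursively
def resSpec (L T : Int) : Char → List Char → Int
  | _, [] => 0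
  | p, c :: t =>
      let L' := if p = 'L' then L + 1 else L
      let T' := if c = 'T' then T - 1 else T
      (if c = 'C' then L' * T' else 0) + resSpec L' T' c t

lemma tcnt_cons (c : Char) (t : List Char) :
    tcnt (c :: t) = (if c = 'T' then 1 else 0) + tcnt t := by
  simp [tcnt, List.count_cons]; split_ifs <;> ring

lemma pyRange_grun {σ : Type} (f : σ → Char → Char → σ) (ss : List Char) :
    ∀ (k a : Nat) (st : σ), 1 ≤ a → a + k ≤ ss.length →
      (PySem.List.pyRange (a : Int) ((a + k : Nat) : Int)).foldl
        (fun st ii => f st (PySem.List.pyGetD ss (ii - 1) ' ') (PySem.List.pyGetD ss ii ' ')) st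
      = grun f st ((ss.drop (a - 1)).take (k + 1)) := by
  intro k
  induction k with
  | zero =>
    intro a st h1 h2
    have : PySem.List.pyRange (a : Int) ((a + 0 : Nat) : Int) = [] := by
      simp [PySem.List.pyRange]
    rw [this]
    simp only [List.foldl_nil]
    rcases h : (ss.drop (a - 1)).take 1 with _ | ⟨x, _ | ⟨y, t⟩⟩
    · rfl
    · rfl
    · exfalso
      have := List.length_take_le 1 (ss.drop (a - 1))
      rw [h] at this; simp at this
  | succ k ih =>
    intro a st h1 h2
    have ha : a < ss.length := by omega
    have ha1 : a - 1 < ss.length := by omega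
    have hcons : PySem.List.pyRange (a : Int) ((a + (k+1) : Nat) : Int)
        = (a : Int) :: PySem.List.pyRange ((a : Int) + 1) ((a + (k+1) : Nat) : Int) := by
      apply PySem.List.pyRange_one_cons
      push_cast; omega
    rw [hcons]
    simp only [List.foldl_cons]
    have e1 : ((a : Int) - 1) = ((a - 1 : Nat) : Int) := by push_cast [h1]; ring
    have e2 : ((a : Int) + 1) = ((a + 1 : Nat) : Int) := by push_cast; ring
    rw [e1, e2]
    rw [PySem.List.pyGetD_natCast, PySem.List.pyGetD_natCast]
    have hnat : (a + (k + 1) : Nat) = ((a + 1) + k : Nat) := by omega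
    rw [hnat]
    rw [ih (a + 1) _ (by omega) (by omega)]
    -- now both sides grun
    have hsub : a - 1 + 1 = a := by omega
    have hd1 : ss.drop (a - 1) = ss[a-1] :: ss.drop a := by
      rw [List.drop_eq_getElem_cons ha1, hsub]
    have hd2 : ss.drop a = ss[a] :: ss.drop (a + 1) := List.drop_eq_getElem_cons ha
    rw [hd1, hd2]
    simp only [List.take_succ_cons]
    rw [show (a + 1 - 1 : Nat) = a from by omega, hd2]
    simp only [List.take_succ_cons]
    show grun f (f st (ss.getD (a-1) ' ') (ss.getD a ' ')) (ss[a] :: List.take k (ss.drop (a+1))) = _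
    rw [List.getD_eq_getElem ss ' ' ha1, List.getD_eq_getElem ss ' ' ha]
    rfl

lemma grun_res (p : Char) (l : List Char) :
    ∀ (res L T : Int), (grun gresStep (res, L, T) (p :: l)).1 = res + resSpec L T p l := by
  induction l generalizing p with
  | nil => intro res L T; simp [grun, resSpec]
  | cons c t ih =>
    intro res L T
    show (grun gresStep (gresStep (res, L, T) p c) (c :: t)).1 = _
    rw [show gresStep (res, L, T) p c
        = ((if c = 'C' then res + (if p = 'L' then L + 1 else L) * (if c = 'T' then T - 1 else T) else res),
           (if p = 'L' then L + 1 else L), (if c = 'T' then T - 1 else T)) from rfl]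
    rw [ih c]
    rw [show resSpec L T p (c :: t)
        = (if c = 'C' then (if p = 'L' then L + 1 else L) * (if c = 'T' then T - 1 else T) else 0)
          + resSpec (if p = 'L' then L + 1 else L) (if c = 'T' then T - 1 else T) c t from rfl]
    split_ifs <;> ring

lemma resSpec_tcnt (p : Char) (l : List Char) :
    ∀ L : Int, resSpec L (tcnt l) p l = sBase (if p = 'L' then L + 1 else L) l := by
  induction l generalizing p with
  | nil => intro L; simp [resSpec, sBase]
  | cons c t ih =>
    intro L
    have ht : (if c = 'T' then tcnt (c :: t) - 1 else tcnt (c :: t)) = tcnt t := by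
      rw [tcnt_cons]; split_ifs <;> ring
    show (if c = 'C' then (if p = 'L' then L + 1 else L) * (if c = 'T' then tcnt (c::t) - 1 else tcnt (c::t)) else 0)
        + resSpec (if p = 'L' then L + 1 else L) (if c = 'T' then tcnt (c::t) - 1 else tcnt (c::t)) c t = _
    rw [ht, ih c]
    show _ = (if c = 'C' then (if p = 'L' then L + 1 else L) * tcnt t else 0)
        + sBase (if c = 'L' then (if p = 'L' then L + 1 else L) + 1 else (if p = 'L' then L + 1 else L)) t
    rfl

lemma resSpec_shift (p : Char) (l : List Char) :
    ∀ L T e : Int, resSpec L (T + e) p l = resSpec L T p l + e * sLC (if p = 'L' then L + 1 else L) l := by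
  induction l generalizing p with
  | nil => intro L T e; simp [resSpec, sLC]
  | cons c t ih =>
    intro L T e
    have hT : (if c = 'T' then T + e - 1 else T + e) = (if c = 'T' then T - 1 else T) + e := by
      split_ifs <;> ring
    show (if c = 'C' then (if p = 'L' then L + 1 else L) * (if c = 'T' then T + e - 1 else T + e) else 0)
        + resSpec (if p = 'L' then L + 1 else L) (if c = 'T' then T + e - 1 else T + e) c t = _
    rw [hT, ih c]
    show _ = ((if c = 'C' then (if p = 'L' then L + 1 else L) * (if c = 'T' then T - 1 else T) else 0)
        + resSpec (if p = 'L' then L + 1 else L) (if c = 'T' then T - 1 else T) c t)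
        + e * ((if c = 'C' then (if p = 'L' then L + 1 else L) else 0)
            + sLC (if c = 'L' then (if p = 'L' then L + 1 else L) + 1 else (if p = 'L' then L + 1 else L)) t)
    split_ifs <;> ring

lemma sBase_shift (l : List Char) : ∀ L e : Int, sBase (L + e) l = sBase L l + e * sCT l := by
  induction l with
  | nil => intro L e; simp [sBase, sCT]
  | cons c t ih =>
    intro L e
    have h : (if c = 'L' then L + e + 1 else L + e) = (if c = 'L' then L + 1 else L) + e := by
      split_ifs <;> ring
    show (if c = 'C' then (L + e) * tcnt t else 0) + sBase (if c = 'L' then L + e + 1 else L + e) t = _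
    rw [h, ih]
    show _ = ((if c = 'C' then L * tcnt t else 0) + sBase (if c = 'L' then L + 1 else L) t)
        + e * ((if c = 'C' then tcnt t else 0) + sCT t)
    split_ifs <;> ring

lemma sLC_shift (l : List Char) : ∀ L e : Int, sLC (L + e) l = sLC L l + e * ccnt l := by
  induction l with
  | nil => intro L e; simp [sLC, ccnt]
  | cons c t ih =>
    intro L e
    have h : (if c = 'L' then L + e + 1 else L + e) = (if c = 'L' then L + 1 else L) + e := by
      split_ifs <;> ring
    have hc : ccnt (c :: t) = (if c = 'C' then 1 else 0) + ccnt t := by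
      simp [ccnt, List.count_cons]; split_ifs <;> ring
    show (if c = 'C' then L + e else 0) + sLC (if c = 'L' then L + e + 1 else L + e) t = _
    rw [h, ih, hc]
    show _ = ((if c = 'C' then L else 0) + sLC (if c = 'L' then L + 1 else L) t)
        + e * ((if c = 'C' then 1 else 0) + ccnt t)
    split_ifs <;> ring

lemma sBase_snoc (l : List Char) (z : Char) :
    ∀ L : Int, sBase L (l ++ [z]) = sBase L l + (if z = 'T' then 1 else 0) * sLC L l := by
  induction l with
  | nil => intro L; simp [sBase, sLC, tcnt]
  | cons c t ih =>
    intro L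
    have ht : tcnt (t ++ [z]) = tcnt t + (if z = 'T' then 1 else 0) := by
      simp [tcnt, List.count_append, List.count_cons, List.count_nil]
    show (if c = 'C' then L * tcnt (t ++ [z]) else 0) + sBase (if c = 'L' then L + 1 else L) (t ++ [z]) = _
    rw [ht, ih]
    show _ = ((if c = 'C' then L * tcnt t else 0) + sBase (if c = 'L' then L + 1 else L) t)
        + (if z = 'T' then 1 else 0) * ((if c = 'C' then L else 0) + sLC (if c = 'L' then L + 1 else L) t)
    split_ifs <;> ring

lemma sCT_snoc (l : List Char) (z : Char) :
    sCT (l ++ [z]) = sCT l + (if z = 'T' then 1 else 0) * ccnt l := by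
  induction l with
  | nil => simp [sCT, ccnt, tcnt]
  | cons c t ih =>
    have ht : tcnt (t ++ [z]) = tcnt t + (if z = 'T' then 1 else 0) := by
      simp [tcnt, List.count_append, List.count_cons, List.count_nil]
    have hc : ccnt (c :: t) = (if c = 'C' then 1 else 0) + ccnt t := by
      simp [ccnt, List.count_cons]; split_ifs <;> ring
    show (if c = 'C' then tcnt (t ++ [z]) else 0) + sCT (t ++ [z]) = _
    rw [ht, ih, hc]
    show _ = ((if c = 'C' then tcnt t else 0) + sCT t)
        + (if z = 'T' then 1 else 0) * ((if c = 'C' then 1 else 0) + ccnt t)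
    split_ifs <;> ring

lemma grun_lt (p : Char) (l : List Char) :
    ∀ (LT L : Int), 0 ≤ LT →
      (grun (fun st a _ => ltStep st a) (LT, L, tcnt (p :: l)) (p :: l)).1
        = max LT (sGC (if p = 'L' then L + 1 else L) l) := by
  induction l generalizing p with
  | nil =>
    intro LT L h
    show LT = max LT (sGC _ [])
    simp [sGC]; omega
  | cons c t ih =>
    intro LT L h
    have hT : (if p = 'T' then tcnt (p :: c :: t) - 1 else tcnt (p :: c :: t)) = tcnt (c :: t) := by
      rw [tcnt_cons]; split_ifs <;> ring
    show (grun (fun st a _ => ltStep st a)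
        (max LT ((if p = 'L' then L + 1 else L) * (if p = 'T' then tcnt (p::c::t) - 1 else tcnt (p::c::t))),
         (if p = 'L' then L + 1 else L),
         (if p = 'T' then tcnt (p::c::t) - 1 else tcnt (p::c::t))) (c :: t)).1 = _
    rw [hT]
    rw [ih c _ _ (le_max_of_le_left h)]
    show _ = max LT (max ((if p = 'L' then L + 1 else L) * tcnt (c :: t))
        (sGC (if c = 'L' then (if p = 'L' then L + 1 else L) + 1 else (if p = 'L' then L + 1 else L)) t))
    rw [max_assoc]

lemma alt_fold (l : List Char) :
    ∀ (L base gL gT gC : Int), 0 ≤ gC →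
      l.foldl altStep (L, tcnt l, base, gL, gT, gC)
        = (L + lcnt l, 0, base + sBase L l, gL + sCT l, gT + sLC L l, max gC (sGC L l)) := by
  induction l with
  | nil =>
    intro L base gL gT gC h
    simp [tcnt, lcnt, sBase, sCT, sLC, sGC]
    omega
  | cons c t ih =>
    intro L base gL gT gC h
    have hstep : altStep (L, tcnt (c :: t), base, gL, gT, gC) c
        = (if c = 'T' then (L, tcnt (c::t) - 1, base, gL, gT, max gC (L * tcnt (c::t)))
           else if c = 'C' then (L, tcnt (c::t), base + L * tcnt (c::t), gL + tcnt (c::t), gT + L, max gC (L * tcnt (c::t)))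
           else if c = 'L' then (L + 1, tcnt (c::t), base, gL, gT, max gC (L * tcnt (c::t)))
           else (L, tcnt (c::t), base, gL, gT, max gC (L * tcnt (c::t)))) := by
      show (if c = 'T' then _ else _) = _
      have hm : (if L * tcnt (c::t) > gC then L * tcnt (c::t) else gC) = max gC (L * tcnt (c::t)) := by
        split_ifs with hlt
        · exact (max_eq_right hlt.le).symm
        · exact (max_eq_left (not_lt.mp hlt)).symm
      rw [hm]
    rw [List.foldl_cons, hstep]
    have hmax : 0 ≤ max gC (L * tcnt (c :: t)) := le_max_of_le_left h
    by_cases h1 : c = 'T'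
    · subst h1
      have ht : tcnt ('T' :: t) - 1 = tcnt t := by rw [tcnt_cons]; simp
      simp only [Char.reduceEq, reduceIte, ht]
      rw [ih L base gL gT (max gC (L * tcnt ('T' :: t))) hmax]
      simp [lcnt, List.count_cons, sBase, sCT, sLC, sGC, tcnt_cons, max_assoc]
    · by_cases h2 : c = 'C'
      · subst h2
        have ht : tcnt ('C' :: t) = tcnt t := by rw [tcnt_cons]; simp
        simp only [Char.reduceEq, reduceIte, ht]
        rw [ih L (base + L * tcnt t) (gL + tcnt t) (gT + L) (max gC (L * tcnt t)) (ht ▸ hmax)]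
        simp [lcnt, List.count_cons, sBase, sCT, sLC, sGC, tcnt_cons, max_assoc, add_assoc]
      · by_cases h3 : c = 'L'
        · subst h3
          have ht : tcnt ('L' :: t) = tcnt t := by rw [tcnt_cons]; simp
          simp only [Char.reduceEq, reduceIte, ht]
          rw [ih (L + 1) base gL gT (max gC (L * tcnt t)) (ht ▸ hmax)]
          simp [lcnt, List.count_cons, sBase, sCT, sLC, sGC, tcnt_cons, max_assoc, add_assoc]
          omega
        · have ht : tcnt (c :: t) = tcnt t := by rw [tcnt_cons]; simp [h1]
          simp only [if_neg h1, if_neg h2, if_neg h3, ht]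
          rw [ih L base gL gT (max gC (L * tcnt t)) (ht ▸ hmax)]
          simp [lcnt, List.count_cons, sBase, sCT, sLC, sGC, tcnt_cons, max_assoc, h1, h2, h3]

-- per-call-site evaluations of A's loops (stated below as sorries first)
lemma sCT_nonneg (l : List Char) : 0 ≤ sCT l := by
  induction l with
  | nil => simp [sCT]
  | cons c t ih =>
    have : (0:Int) ≤ tcnt t := by simp [tcnt]
    show 0 ≤ (if c = 'C' then tcnt t else 0) + sCT t
    split_ifs <;> omega

lemma getRes_self (cs : List Char) : getRes cs (cs.length : Int) = sBase 0 cs := by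
  cases cs with
  | nil => simp [getRes, sBase, PySem.List.pyRange]
  | cons c t =>
    unfold getRes
    rw [PySem.List.slice_from_one]
    have h := pyRange_grun gresStep (c :: t) t.length 1 ((0:Int), (0:Int), tcnt t) (le_refl 1) (by simp <;> omega)
    rw [show (1 + t.length) = t.length + 1 from by omega] at h
    have hseg : (((c :: t).drop (1 - 1)).take (t.length + 1)) = c :: t := by simp
    rw [hseg] at h
    rw [show (PySem.List.pyRange 1 ((c :: t).length : Int)).foldl
        (fun st ii => gresStep st (PySem.List.pyGetD (c :: t) (ii - 1) ' ') (PySem.List.pyGetD (c :: t) ii ' '))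
        ((0 : Int), (0 : Int), (((c :: t).tail.count 'T' : Nat) : Int))
        = grun gresStep ((0:Int), (0:Int), tcnt t) (c :: t) from h]
    rw [grun_res c t 0 0 (tcnt t), resSpec_tcnt c t 0]
    show _ = (if c = 'C' then 0 * tcnt t else 0) + sBase (if c = 'L' then 0 + 1 else 0) t
    split_ifs <;> ring

lemma getRes_L (cs : List Char) :
    getRes ('L' :: cs) (cs.length : Int) = sBase 0 cs + sCT cs := by
  rcases List.eq_nil_or_concat cs with rfl | ⟨l0, z, rfl⟩
  · simp [getRes, sBase, sCT, PySem.List.pyRange]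
  · simp only [List.concat_eq_append]
    unfold getRes
    rw [PySem.List.slice_from_one]
    have hlen : (l0 ++ [z]).length = l0.length + 1 := by simp
    have h := pyRange_grun gresStep ('L' :: (l0 ++ [z])) l0.length 1
      ((0:Int), (0:Int), tcnt (l0 ++ [z])) (le_refl 1) (by simp <;> omega)
    rw [show (1 + l0.length) = l0.length + 1 from by omega] at h
    have hseg : ((('L' :: (l0 ++ [z])).drop (1 - 1)).take (l0.length + 1)) = 'L' :: l0 := by
      simp [List.take_left]
    rw [hseg] at h
    rw [show (PySem.List.pyRange 1 ((l0 ++ [z]).length : Int)).foldl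
        (fun st ii => gresStep st (PySem.List.pyGetD ('L' :: (l0 ++ [z])) (ii - 1) ' ')
          (PySem.List.pyGetD ('L' :: (l0 ++ [z])) ii ' '))
        ((0 : Int), (0 : Int), ((('L' :: (l0 ++ [z])).tail.count 'T' : Nat) : Int))
        = grun gresStep ((0:Int), (0:Int), tcnt (l0 ++ [z])) ('L' :: l0) from by
          rw [hlen]; exact h]
    have htz : tcnt (l0 ++ [z]) = tcnt l0 + (if z = 'T' then 1 else 0) := by
      simp [tcnt, List.count_append, List.count_cons]
    rw [grun_res 'L' l0 0 0 _, htz, resSpec_shift 'L' l0 0 (tcnt l0) _, resSpec_tcnt 'L' l0 0]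
    simp only [Char.reduceEq, reduceIte]
    rw [show (0:Int) + 1 = 0 + (1:Int) from rfl, sBase_shift l0 0 1, sLC_shift l0 0 1,
        sBase_snoc l0 z 0, sCT_snoc l0 z]
    ring

lemma getRes_T (cs : List Char) :
    getRes (cs ++ ['T']) (cs.length : Int) = sBase 0 cs + sLC 0 cs := by
  cases cs with
  | nil => simp [getRes, sBase, sLC, PySem.List.pyRange]
  | cons c t =>
    unfold getRes
    rw [PySem.List.slice_from_one]
    have h := pyRange_grun gresStep ((c :: t) ++ ['T']) t.length 1
      ((0:Int), (0:Int), tcnt (t ++ ['T'])) (le_refl 1) (by simp <;> omega)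
    rw [show (1 + t.length) = t.length + 1 from by omega] at h
    have hseg : ((((c :: t) ++ ['T']).drop (1 - 1)).take (t.length + 1)) = c :: t := by
      have : ((c :: t) ++ ['T']).take (c :: t).length = c :: t := List.take_left
      simpa using this
    rw [hseg] at h
    rw [show (PySem.List.pyRange 1 ((c :: t).length : Int)).foldl
        (fun st ii => gresStep st (PySem.List.pyGetD ((c :: t) ++ ['T']) (ii - 1) ' ')
          (PySem.List.pyGetD ((c :: t) ++ ['T']) ii ' '))
        ((0 : Int), (0 : Int), ((((c :: t) ++ ['T']).tail.count 'T' : Nat) : Int))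
        = grun gresStep ((0:Int), (0:Int), tcnt (t ++ ['T'])) (c :: t) from h]
    have htz : tcnt (t ++ ['T']) = tcnt t + 1 := by
      simp [tcnt, List.count_append, List.count_cons]
    rw [grun_res c t 0 0 _, htz, resSpec_shift c t 0 (tcnt t) 1, resSpec_tcnt c t 0]
    show _ = ((if c = 'C' then 0 * tcnt t else 0) + sBase (if c = 'L' then 0 + 1 else 0) t)
        + ((if c = 'C' then (0:Int) else 0) + sLC (if c = 'L' then 0 + 1 else 0) t)
    split_ifs <;> ring

lemma lt_loop (cs : List Char) :
    ((PySem.List.pyRange 1 (cs.length : Int)).foldl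
      (fun st ii => ltStep st (PySem.List.pyGetD cs (ii - 1) ' '))
      ((0 : Int), (0 : Int), (cs.count 'T' : Int))).1 = sGC 0 cs := by
  cases cs with
  | nil => simp [sGC, PySem.List.pyRange]
  | cons c t =>
    have h := pyRange_grun (fun st a _ => ltStep st a) (c :: t) t.length 1
      ((0:Int), (0:Int), tcnt (c :: t)) (le_refl 1) (by simp <;> omega)
    rw [show (1 + t.length) = t.length + 1 from by omega] at h
    have hseg : (((c :: t).drop (1 - 1)).take (t.length + 1)) = c :: t := by simp
    rw [hseg] at h
    rw [show (PySem.List.pyRange 1 ((c :: t).length : Int)).foldl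
        (fun st ii => ltStep st (PySem.List.pyGetD (c :: t) (ii - 1) ' '))
        ((0 : Int), (0 : Int), (((c :: t).count 'T' : Nat) : Int))
        = grun (fun st a _ => ltStep st a) ((0:Int), (0:Int), tcnt (c :: t)) (c :: t) from h]
    rw [grun_lt c t 0 0 (le_refl 0)]
    show _ = max (0 * tcnt (c :: t)) (sGC (if c = 'L' then 0 + 1 else 0) t)
    simp

-- the whole equality, on the character list
lemma key (cs : List Char) :
    max (max (getRes ('L' :: cs) (cs.length : Int)) (getRes (cs ++ ['T']) (cs.length : Int)))
      (getRes cs (cs.length : Int) +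
        ((PySem.List.pyRange 1 (cs.length : Int)).foldl
          (fun st ii => ltStep st (PySem.List.pyGetD cs (ii - 1) ' '))
          ((0 : Int), (0 : Int), (cs.count 'T' : Int))).1)
    = (cs.foldl altStep ((0 : Int), (cs.count 'T' : Int), (0 : Int), (0 : Int), (0 : Int), (0 : Int))).2.2.1 +
      max (max (cs.foldl altStep ((0 : Int), (cs.count 'T' : Int), 0, 0, 0, 0)).2.2.2.1
          (cs.foldl altStep ((0 : Int), (cs.count 'T' : Int), 0, 0, 0, 0)).2.2.2.2.1)
        (cs.foldl altStep ((0 : Int), (cs.count 'T' : Int), 0, 0, 0, 0)).2.2.2.2.2 := by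
  rw [getRes_self, getRes_L, getRes_T, lt_loop]
  rw [show ((cs.count 'T' : Nat) : Int) = tcnt cs from rfl,
      alt_fold cs 0 0 0 0 0 (le_refl 0)]
  simp only [zero_add]
  rw [max_add_add_left, max_add_add_left]
  congr 1
  rcases le_total (sGC 0 cs) 0 with hg | hg
  · have hx : sGC 0 cs ≤ max (sCT cs) (sLC 0 cs) :=
      le_trans hg (le_trans (sCT_nonneg cs) (le_max_left _ _))
    rw [max_eq_left hx, max_eq_left hg,
        max_eq_left (le_trans (sCT_nonneg cs) (le_max_left _ _))]
  · rw [max_eq_right hg]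

-- ===== VERDICT (by name: the statement is the Claim_ definition above) =====
theorem numOfSubsequences_spec : Claim_equal_numOfSubsequences := by
  intro s _
  show numOfSubsequences s = numOfSubsequences_alt s
  exact key s.toList
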